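-- pv_equiv track=rewrite | github.com/narcispr/coachess | chess_analysis.py | check_movement
-- ===== SOURCE A (Python) =====
-- trp_green = "rgba(0, 255, 0, 0.5)"
--
-- trp_blue = "rgba(0, 0, 255, 0.5)"
--
-- trp_light_green = "rgba(144, 238, 144, 0.5)"
--
-- trp_orange = "rgba(255, 165, 0, 0.5)"
--
-- trp_yellow = "rgba(255, 255, 0, 0.5)"
--
-- trp_red = "rgba(255, 0, 0, 0.5)"
--
-- def check_movement(real_score, scores):
--     color = trp_red
--     difference = real_score[1] - max(scores, key=lambda x: x[1])[1]
--     if real_score[0] == max(scores, key=lambda x: x[1])[0]: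
--         text = "Best movement!!!"
--         difference = 0
--         color = trp_blue
--     elif difference > -30:
--         text = "Excellent Movement!"
--         color = trp_green
--     elif difference > -75:
--         text = "Good Movement"
--         color = trp_light_green
--     elif difference > -150:
--         text = "Blunder"
--         color = trp_yellow
--     elif difference > -250:
--         text = "Error!"
--         color = trp_orange
--     else:
--         text = "Big Mistake!!!"
--         color = trp_red
--
--     # get all the movements with a similar score (up to 50 points) from the best one
--     similar_scores = [x for x in scores if abs(x[1] - max(scores, key=lambda x: x[1])[1]) < 50]
--     # sort similar scores by the best movement
--     similar_scores.sort(key=lambda x: x[1], reverse=True)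
--     # if real_score[0] in list of tuples similar_scores remove it.
--     alternatives = []
--     for i, score in enumerate(similar_scores):
--         if real_score[0] == score[0]:
--             similar_scores.pop(i)
--             break
--         else:
--             alternatives.append(score)
--     return color, similar_scores, (difference, text)
-- ===== SOURCE B (Python) =====
-- trp_green = "rgba(0, 255, 0, 0.5)"
-- trp_blue = "rgba(0, 0, 255, 0.5)"
-- trp_light_green = "rgba(144, 238, 144, 0.5)"
-- trp_orange = "rgba(255, 165, 0, 0.5)"
-- trp_yellow = "rgba(255, 255, 0, 0.5)"
-- trp_red = "rgba(255, 0, 0, 0.5)"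
--
-- def check_movement(real_score, scores):
--     # one stable descending sort; its head is the first maximum (what max() picks)
--     ranked = sorted(scores, key=lambda x: x[1], reverse=True)
--     best = ranked[0]
--     similar = [x for x in ranked if abs(x[1] - best[1]) < 50]
--     idx = next((i for i, s in enumerate(similar) if real_score[0] == s[0]), None)
--     if idx is not None:
--         similar = similar[:idx] + similar[idx + 1:]
--     if real_score[0] == best[0]:
--         return trp_blue, similar, (0, "Best movement!!!")
--     d = real_score[1] - best[1]
--     if d > -30:
--         return trp_green, similar, (d, "Excellent Movement!")
--     if d > -75:
--         return trp_light_green, similar, (d, "Good Movement")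
--     if d > -150:
--         return trp_yellow, similar, (d, "Blunder")
--     if d > -250:
--         return trp_orange, similar, (d, "Error!")
--     return trp_red, similar, (d, "Big Mistake!!!")
-- ===== Notes on version B (the rewrite author's own statement) =====
-- stated objective: faster
-- what changed: B sorts the whole list once (stable, descending) and takes its head as the best move, instead of A's four separate max() scans plus a sort of the filtered sublist; the similarity filter runs over the already-sorted list and the first name match is removed by index.
import Mathlib
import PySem

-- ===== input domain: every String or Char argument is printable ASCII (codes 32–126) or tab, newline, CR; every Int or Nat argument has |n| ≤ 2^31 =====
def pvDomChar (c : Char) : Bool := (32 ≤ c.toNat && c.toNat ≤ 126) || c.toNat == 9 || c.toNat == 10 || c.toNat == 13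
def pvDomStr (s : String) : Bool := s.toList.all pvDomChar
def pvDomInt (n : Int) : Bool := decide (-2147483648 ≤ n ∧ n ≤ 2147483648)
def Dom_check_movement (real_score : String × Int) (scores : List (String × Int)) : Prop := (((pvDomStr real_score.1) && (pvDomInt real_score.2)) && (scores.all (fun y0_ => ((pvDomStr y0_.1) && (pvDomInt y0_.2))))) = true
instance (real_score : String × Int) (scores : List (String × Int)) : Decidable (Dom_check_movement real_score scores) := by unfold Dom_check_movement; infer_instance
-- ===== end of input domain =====

-- B replaces A's four max() scans (one re-evaluated per element of the filter comprehension, O(n^2))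
-- by one stable descending sort whose head is the best move; equivalence is about the return value only.

def trp_green : String := "rgba(0, 255, 0, 0.5)"
def trp_blue : String := "rgba(0, 0, 255, 0.5)"
def trp_light_green : String := "rgba(144, 238, 144, 0.5)"
def trp_orange : String := "rgba(255, 165, 0, 0.5)"
def trp_yellow : String := "rgba(255, 255, 0, 0.5)"
def trp_red : String := "rgba(255, 0, 0, 0.5)"

-- ===== PORT A =====
-- A's enumerate/pop/break loop: it removes the first element whose [0] equals real_score[0]
-- (the `alternatives` list A builds alongside is dead code — never returned).
def popFirstA (name : String) : List (String × Int) → List (String × Int)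
  | [] => []
  | s :: rest => if name = s.1 then rest else s :: popFirstA name rest

def check_movement (real_score : String × Int) (scores : List (String × Int)) : String × (List (String × Int)) × (Int × String) :=
  -- max(scores, key=lambda x: x[1]) raises ValueError on [] → excluded by Pre_; junk value outside Pre_
  match PySem.List.max? scores (fun x => x.2) with
  | none => ("", [], (0, ""))
  | some best =>
    let difference := real_score.2 - best.2
    let ctd : String × String × Int :=
      if real_score.1 = best.1 then (trp_blue, "Best movement!!!", 0)
      else if difference > -30 then (trp_green, "Excellent Movement!", difference)
      else if difference > -75 then (trp_light_green, "Good Movement", difference)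
      else if difference > -150 then (trp_yellow, "Blunder", difference)
      else if difference > -250 then (trp_orange, "Error!", difference)
      else (trp_red, "Big Mistake!!!", difference)
    let similar_scores := scores.filter (fun x => decide (|x.2 - best.2| < 50))
    let similar_scores := PySem.List.sorted similar_scores (fun x => x.2) true
    let similar_scores := popFirstA real_score.1 similar_scores
    (ctd.1, similar_scores, (ctd.2.2, ctd.2.1))

-- ===== PORT B =====
-- B's removal: find the index of the first name match, then splice it out (xs[:i] + xs[i+1:]).
def dropFirstB (name : String) (xs : List (String × Int)) : List (String × Int) :=
  match xs.findIdx? (fun s => name == s.1) with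
  | none => xs
  | some i => xs.eraseIdx i

def check_movement_alt (real_score : String × Int) (scores : List (String × Int)) : String × (List (String × Int)) × (Int × String) :=
  let ranked := PySem.List.sorted scores (fun x => x.2) true
  match ranked with
  | [] => ("", [], (0, ""))  -- ranked[0] raises IndexError on [] → excluded by Pre_
  | best :: _ =>
    let similar := dropFirstB real_score.1 (ranked.filter (fun x => decide (|x.2 - best.2| < 50)))
    if real_score.1 = best.1 then (trp_blue, similar, (0, "Best movement!!!"))
    else
      let d := real_score.2 - best.2
      if d > -30 then (trp_green, similar, (d, "Excellent Movement!"))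
      else if d > -75 then (trp_light_green, similar, (d, "Good Movement"))
      else if d > -150 then (trp_yellow, similar, (d, "Blunder"))
      else if d > -250 then (trp_orange, similar, (d, "Error!"))
      else (trp_red, similar, (d, "Big Mistake!!!"))

-- ===== PRECONDITION & SPEC =====
-- A raises ValueError (max of an empty sequence) on scores = []; that is the only exception.
def Pre_check_movement (real_score : String × Int) (scores : List (String × Int)) : Prop := scores ≠ []
instance (real_score : String × Int) (scores : List (String × Int)) : Decidable (Pre_check_movement real_score scores) := by unfold Pre_check_movement; infer_instance

def pvWitness_check_movement : (String × Int) × (List (String × Int)) := (("e4", 100), [("e4", 100), ("d4", 80)])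

def Spec_check_movement (real_score : String × Int) (scores : List (String × Int)) (out : String × (List (String × Int)) × (Int × String)) : Prop := out = check_movement_alt real_score scores
instance (real_score : String × Int) (scores : List (String × Int)) (out : String × (List (String × Int)) × (Int × String)) : Decidable (Spec_check_movement real_score scores out) := by unfold Spec_check_movement; infer_instance

-- ===== CLAIM (what is proved, stated in full; the proofs are below) =====
def Claim_equal_check_movement : Prop := ∀ (real_score : String × Int) (scores : List (String × Int)), Dom_check_movement real_score scores → Pre_check_movement real_score scores → Spec_check_movement real_score scores (check_movement real_score scores)

-- ===== LEMMAS AND PROOFS =====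

-- the insertion step of PySem's reverse stable sort, key = (·.2)
def insR (acc : List (String × Int)) (x : String × Int) : List (String × Int) :=
  PySem.List.insertBy (fun a b => decide (b.2 < a.2)) x acc

lemma sorted_rev_def (xs : List (String × Int)) :
    PySem.List.sorted xs (fun x => x.2) true = xs.foldl insR [] := by
  simp only [PySem.List.sorted]
  rfl

-- descending pairwise order is preserved by insertion
lemma insR_pairwise (x : String × Int) (ys : List (String × Int))
    (h : ys.Pairwise (fun a b => b.2 ≤ a.2)) :
    (insR ys x).Pairwise (fun a b => b.2 ≤ a.2) := by
  induction ys with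
  | nil => simp [insR, PySem.List.insertBy]
  | cons y ys ih =>
    rcases List.pairwise_cons.mp h with ⟨hy, ht⟩
    by_cases hlt : y.2 < x.2
    · have hstep : insR (y :: ys) x = x :: y :: ys := by
        simp [insR, PySem.List.insertBy, hlt]
      rw [hstep]
      refine List.pairwise_cons.mpr ⟨?_, h⟩
      intro z hz
      rcases List.mem_cons.mp hz with rfl | hz
      · omega
      · exact le_trans (hy z hz) (le_of_lt hlt)
    · have hstep : insR (y :: ys) x = y :: insR ys x := by
        simp [insR, PySem.List.insertBy, hlt]
      rw [hstep]
      refine List.pairwise_cons.mpr ⟨?_, ih ht⟩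
      intro z hz
      rcases (PySem.List.mem_insertBy _ _ _ _).mp hz with rfl | hz'
      · omega
      · exact hy z hz'

-- inserting x in front of a descending list whose kept elements all have smaller key
lemma insR_front (x : String × Int) (l : List (String × Int))
    (hl : ∀ z ∈ l, z.2 < x.2) : insR l x = x :: l := by
  cases l with
  | nil => rfl
  | cons z zs => simp [insR, PySem.List.insertBy, hl z (by simp)]

-- filtering commutes with one insertion into a descending list
lemma filter_insR (p : String × Int → Bool) (x : String × Int) (ys : List (String × Int))
    (h : ys.Pairwise (fun a b => b.2 ≤ a.2)) :
    (insR ys x).filter p = if p x then insR (ys.filter p) x else ys.filter p := by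
  induction ys with
  | nil => by_cases hx : p x <;> simp [insR, PySem.List.insertBy, hx]
  | cons y ys ih =>
    rcases List.pairwise_cons.mp h with ⟨hy, ht⟩
    by_cases hlt : y.2 < x.2
    · have hstep : insR (y :: ys) x = x :: y :: ys := by
        simp [insR, PySem.List.insertBy, hlt]
      rw [hstep]
      by_cases hx : p x
      · have hall : ∀ z ∈ (y :: ys).filter p, z.2 < x.2 := by
          intro z hz
          rcases List.mem_cons.mp (List.mem_of_mem_filter hz) with rfl | hz'
          · exact hlt
          · exact lt_of_le_of_lt (hy z hz') hlt
        rw [List.filter_cons_of_pos hx, if_pos hx, insR_front x _ hall]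
      · rw [List.filter_cons_of_neg hx, if_neg hx]
    · have hstep : insR (y :: ys) x = y :: insR ys x := by
        simp [insR, PySem.List.insertBy, hlt]
      rw [hstep]
      by_cases hpy : p y
      · rw [List.filter_cons_of_pos hpy, ih ht, List.filter_cons_of_pos hpy]
        by_cases hx : p x
        · rw [if_pos hx, if_pos hx]
          have : insR (y :: ys.filter p) x = y :: insR (ys.filter p) x := by
            simp [insR, PySem.List.insertBy, hlt]
          rw [this]
        · rw [if_neg hx, if_neg hx]
      · rw [List.filter_cons_of_neg hpy, ih ht, List.filter_cons_of_neg hpy]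

-- filtering commutes with the whole sort fold
lemma filter_foldl_insR (p : String × Int → Bool) :
    ∀ (xs acc : List (String × Int)), acc.Pairwise (fun a b => b.2 ≤ a.2) →
    (xs.foldl insR acc).filter p = (xs.filter p).foldl insR (acc.filter p) := by
  intro xs
  induction xs with
  | nil => intro acc _; simp
  | cons x xs ih =>
    intro acc hacc
    have h1 : (xs.foldl insR (insR acc x)).filter p
        = (xs.filter p).foldl insR ((insR acc x).filter p) :=
      ih (insR acc x) (insR_pairwise x acc hacc)
    simp only [List.foldl_cons, List.filter_cons]
    rw [h1, filter_insR p x acc hacc]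
    by_cases hx : p x <;> simp [hx]

-- sorted-then-filter = filter-then-sorted (stable reverse sort)
lemma filter_sorted_rev (p : String × Int → Bool) (xs : List (String × Int)) :
    (PySem.List.sorted xs (fun x => x.2) true).filter p
      = PySem.List.sorted (xs.filter p) (fun x => x.2) true := by
  rw [sorted_rev_def, sorted_rev_def, filter_foldl_insR p xs [] (by simp)]
  rfl

-- the head of the reverse stable sort is the FIRST maximum, i.e. what max() returns
def maxStep (o : Option (String × Int)) (x : String × Int) : Option (String × Int) :=
  match o with
  | none => some x
  | some m => if m.2 < x.2 then some x else some m

lemma max?_def (xs : List (String × Int)) :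
    PySem.List.max? xs (fun x => x.2) = xs.foldl maxStep none := by
  simp only [PySem.List.max?]
  congr 1
  funext o x
  cases o <;> rfl

lemma head?_foldl_insR :
    ∀ (xs acc : List (String × Int)), acc.Pairwise (fun a b => b.2 ≤ a.2) →
    (xs.foldl insR acc).head? = xs.foldl maxStep acc.head? := by
  intro xs
  induction xs with
  | nil => intro acc _; rfl
  | cons x xs ih =>
    intro acc hacc
    simp only [List.foldl_cons]
    rw [ih (insR acc x) (insR_pairwise x acc hacc)]
    congr 1
    cases acc with
    | nil => rfl
    | cons y ys =>
      by_cases hlt : y.2 < x.2 <;>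
        simp [insR, PySem.List.insertBy, hlt, maxStep]

lemma max?_eq_head_sorted_rev (xs : List (String × Int)) :
    PySem.List.max? xs (fun x => x.2) = (PySem.List.sorted xs (fun x => x.2) true).head? := by
  rw [max?_def, sorted_rev_def, head?_foldl_insR xs [] (by simp)]
  rfl

-- A's pop-in-a-loop equals B's find-index-and-splice
lemma popFirstA_eq_dropFirstB (name : String) (xs : List (String × Int)) :
    popFirstA name xs = dropFirstB name xs := by
  induction xs with
  | nil => rfl
  | cons s rest ih =>
    by_cases h : name = s.1
    · simp [popFirstA, dropFirstB, List.findIdx?_cons, h]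
    · have hb : (name == s.1) = false := by simpa using h
      cases hfi : rest.findIdx? (fun s => name == s.1) with
      | none => simp [popFirstA, h, ih, dropFirstB, List.findIdx?_cons, hb, hfi]
      | some i =>
        simp [popFirstA, h, ih, dropFirstB, List.findIdx?_cons, hb, hfi,
          List.eraseIdx_cons_succ]

-- ===== VERDICT (by name: the statement is the Claim_ definition above) =====
theorem check_movement_spec : Claim_equal_check_movement := by
  intro rs scores _ hpre
  unfold Spec_check_movement
  unfold check_movement check_movement_alt
  have hne : PySem.List.sorted scores (fun x => x.2) true ≠ [] := by
    intro hnil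
    have hperm := PySem.List.sorted_perm scores (fun x => x.2) true
    rw [hnil] at hperm
    exact hpre hperm.symm.eq_nil
  cases hR : PySem.List.sorted scores (fun x => x.2) true with
  | nil => exact absurd hR hne
  | cons best t =>
    have hmax : PySem.List.max? scores (fun x => x.2) = some best := by
      rw [max?_eq_head_sorted_rev, hR]; rfl
    rw [hmax]
    have hsim :
        PySem.List.sorted (scores.filter (fun x => decide (|x.2 - best.2| < 50))) (fun x => x.2) true
          = (best :: t).filter (fun x => decide (|x.2 - best.2| < 50)) := by
      rw [← filter_sorted_rev, hR]
    simp only [hsim, popFirstA_eq_dropFirstB]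
    by_cases h1 : rs.1 = best.1
    · simp [h1]
    · simp only [h1, if_false]
      by_cases h2 : rs.2 - best.2 > -30
      · simp [h2]
      · simp only [h2, if_false]
        by_cases h3 : rs.2 - best.2 > -75
        · simp [h3]
        · simp only [h3, if_false]
          by_cases h4 : rs.2 - best.2 > -150
          · simp [h4]
          · simp only [h4, if_false]
            by_cases h5 : rs.2 - best.2 > -250 <;> simp [h5]
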